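-- pv_equiv track=rewrite | github.com/mtrs8/association-rules-data-mining | main/atividade.py | compareTo
-- ===== SOURCE A (Python) =====
-- def compareTo(dados1, dados2):
-- 	valor = 0
-- 	for i in dados1:
-- 		for j in dados2:
-- 			if i == j:
-- 				if dados1[i] == dados2[j]:
-- 					valor += 1
-- 	return valor
-- ===== SOURCE B (Python) =====
-- def compareTo(dados1, dados2):
--     common = dados1.keys() & dados2.keys()
--     return sum(dados1[k] == dados2[k] for k in common)
-- ===== Notes on version B (the rewrite author's own statement) =====
-- stated objective: faster
-- what changed: Replaces the nested scan over both key sequences with a key-set intersection followed by a single pass summing value-equality over the common keys.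
import Mathlib
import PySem

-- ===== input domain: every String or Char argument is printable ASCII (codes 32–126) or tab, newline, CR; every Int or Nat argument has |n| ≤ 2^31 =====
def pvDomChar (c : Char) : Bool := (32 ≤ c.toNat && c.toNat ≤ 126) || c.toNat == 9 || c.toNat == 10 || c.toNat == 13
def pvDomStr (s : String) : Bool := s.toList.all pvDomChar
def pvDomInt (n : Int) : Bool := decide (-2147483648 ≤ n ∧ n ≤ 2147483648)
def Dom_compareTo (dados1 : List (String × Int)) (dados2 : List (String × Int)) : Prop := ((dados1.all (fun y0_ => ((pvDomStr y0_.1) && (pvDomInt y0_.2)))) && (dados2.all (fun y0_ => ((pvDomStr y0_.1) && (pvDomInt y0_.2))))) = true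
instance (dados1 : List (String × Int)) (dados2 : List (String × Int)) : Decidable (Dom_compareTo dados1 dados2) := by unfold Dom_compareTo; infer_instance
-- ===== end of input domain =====

-- B replaces A's nested scan over both dicts with a key-set intersection and one pass
-- summing value equality over the common keys (objective: faster, O(n+m) vs O(n*m)).

-- ===== PORT A =====
-- Nested loops over the keys of both dicts; dados1[i] / dados2[j] is first-match
-- association-list lookup (exact for a dict, whose keys are distinct).
def compareTo (dados1 : List (String × Int)) (dados2 : List (String × Int)) : Int :=
  dados1.foldl (fun valor i =>
    dados2.foldl (fun valor j =>
      if i.1 = j.1 then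
        if dados1.lookup i.1 = dados2.lookup j.1 then valor + 1 else valor
      else valor) valor) 0

-- ===== PORT B =====
-- common = dados1.keys() & dados2.keys(): the intersection, ported in dados1's key order
-- (a Python set iterates in unspecified order; the sum below is order-invariant),
-- then sum(dados1[k] == dados2[k] for k in common).
def compareTo_alt (dados1 : List (String × Int)) (dados2 : List (String × Int)) : Int :=
  let keys2 := dados2.map Prod.fst
  let common := (dados1.map Prod.fst).filter (fun k => keys2.contains k)
  (common.map (fun k => if dados1.lookup k = dados2.lookup k then (1 : Int) else 0)).sum

-- ===== PRECONDITION & SPEC =====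
-- Pre_ is the dict representation invariant: each association list stands for a Python
-- dict, so its keys are distinct. It excludes no Python input (a dict cannot carry
-- duplicate keys); it only pins down the Lean encoding.
def Pre_compareTo (dados1 : List (String × Int)) (dados2 : List (String × Int)) : Prop :=
  (dados1.map Prod.fst).Nodup ∧ (dados2.map Prod.fst).Nodup
instance (dados1 : List (String × Int)) (dados2 : List (String × Int)) : Decidable (Pre_compareTo dados1 dados2) := by unfold Pre_compareTo; infer_instance

def pvWitness_compareTo : (List (String × Int)) × (List (String × Int)) :=
  ([("a", 1), ("b", 2)], [("a", 1), ("c", 3)])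

def Spec_compareTo (dados1 : List (String × Int)) (dados2 : List (String × Int)) (out : Int) : Prop := out = compareTo_alt dados1 dados2
instance (dados1 : List (String × Int)) (dados2 : List (String × Int)) (out : Int) : Decidable (Spec_compareTo dados1 dados2 out) := by unfold Spec_compareTo; infer_instance

-- ===== CLAIM (what is proved, stated in full; the proofs are below) =====
def Claim_equal_compareTo : Prop := ∀ (dados1 : List (String × Int)) (dados2 : List (String × Int)), Dom_compareTo dados1 dados2 → Pre_compareTo dados1 dados2 → Spec_compareTo dados1 dados2 (compareTo dados1 dados2)

-- ===== LEMMAS AND PROOFS =====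

-- A's inner loop over l adds (count of the outer key among l's keys) × (value-match indicator).
lemma pv_inner_loop (d2 : List (String × Int)) (x : Option Int) (k : String) :
    ∀ (l : List (String × Int)) (acc : Int),
    l.foldl (fun v j => if k = j.1 then (if x = d2.lookup j.1 then v + 1 else v) else v) acc
      = acc + ((l.map Prod.fst).count k) * (if x = d2.lookup k then 1 else 0) := by
  intro l
  induction l with
  | nil => intro acc; simp
  | cons p t ih =>
      intro acc
      simp only [List.foldl_cons, List.map_cons, List.count_cons]
      by_cases hk : k = p.1
      · rw [if_pos hk, ← hk]
        by_cases hc : x = d2.lookup k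
        · rw [if_pos hc, ih, if_pos hc]
          simp
          ring
        · rw [if_neg hc, ih, if_neg hc]
          simp
      · have hne : (p.1 == k) = false := by
          simp
          exact fun h => hk h.symm
        rw [if_neg hk, ih]
        simp [hne]

-- A's whole nested loop is the sum, over dados1's keys, of those per-key contributions.
lemma pv_outer (dados1 dados2 : List (String × Int)) :
    ∀ (l : List (String × Int)) (acc : Int),
    l.foldl (fun valor i => dados2.foldl (fun v j =>
        if i.1 = j.1 then (if dados1.lookup i.1 = dados2.lookup j.1 then v + 1 else v) else v) valor) acc
      = acc + ((l.map Prod.fst).map (fun k => ((dados2.map Prod.fst).count k : Int) *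
          (if dados1.lookup k = dados2.lookup k then 1 else 0))).sum := by
  intro l
  induction l with
  | nil => intro acc; simp
  | cons p t ih =>
      intro acc
      simp only [List.foldl_cons, List.map_cons, List.sum_cons]
      rw [pv_inner_loop dados2 (dados1.lookup p.1) p.1 dados2 acc, ih]
      ring

-- Sum over a filter = sum of guarded terms.
lemma pv_sum_filter (p : String → Bool) (g : String → Int) :
    ∀ (l : List String),
    ((l.filter p).map g).sum = (l.map (fun k => if p k then g k else 0)).sum := by
  intro l
  induction l with
  | nil => simp
  | cons x t ih =>
      by_cases hx : p x
      · simp [hx, ih]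
      · simp [hx, ih]

-- In a Nodup list, count is the membership indicator.
lemma pv_count_nodup (l : List String) (h : l.Nodup) (k : String) :
    l.count k = if l.contains k then 1 else 0 := by
  by_cases hm : k ∈ l
  · simp only [List.contains_iff_mem, hm, if_pos]
    exact List.count_eq_one_of_mem h hm
  · simp [List.count_eq_zero_of_not_mem hm, hm]

theorem pv_main (dados1 dados2 : List (String × Int))
    (h2 : (dados2.map Prod.fst).Nodup) :
    compareTo dados1 dados2 = compareTo_alt dados1 dados2 := by
  unfold compareTo compareTo_alt
  rw [pv_outer dados1 dados2 dados1 0, pv_sum_filter]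
  simp only [Int.zero_add]
  congr 1
  apply List.map_congr_left
  intro k _
  rw [pv_count_nodup _ h2 k]
  split_ifs <;> simp

-- ===== VERDICT (by name: the statement is the Claim_ definition above) =====
theorem compareTo_spec : Claim_equal_compareTo := by
  intro dados1 dados2 _ hpre
  unfold Spec_compareTo
  exact pv_main dados1 dados2 hpre.2
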